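-- pv_equiv track=rewrite | github.com/sarnthil/extract-emotion-data | scripts/clausify.py | join_tiny_clauses_with_next
-- ===== SOURCE A (Python) =====
-- def join_tiny_clauses_with_next(clauses):
--     # [["This", "is", "just"], ["because"], ["it", "is", "so"]]
--     # [["This", "is", "just"], ["because", "it", "is", "so"]]
--     clauses_rev = iter(reversed(clauses))
--
--     fixed = []
--     for clause in clauses_rev:
--         if len(clause) < 2 and fixed:
--             fixed[-1] = clause + fixed[-1]
--             continue
--         fixed.append(clause)
--     return list(reversed(fixed))
-- ===== SOURCE B (Python) =====
-- def join_tiny_clauses_with_next(clauses):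
--     result = []
--     pending = []
--     for clause in clauses:
--         if len(clause) < 2:
--             pending.append(clause)
--         elif not pending:
--             result.append(clause)
--         else:
--             merged = []
--             for p in pending:
--                 merged.extend(p)
--             result.append(merged + clause)
--             pending = []
--     if pending:
--         merged = []
--         for p in pending:
--             merged.extend(p)
--         result.append(merged)
--     return result
-- ===== Notes on version B (the rewrite author's own statement) =====
-- stated objective: simpler
-- what changed: Single forward pass accumulating pending tiny clauses and flushing them into the next big clause, instead of iterating over the reversed list, surgically editing the last element of the accumulator, and reversing the result back.
import Mathlib
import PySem

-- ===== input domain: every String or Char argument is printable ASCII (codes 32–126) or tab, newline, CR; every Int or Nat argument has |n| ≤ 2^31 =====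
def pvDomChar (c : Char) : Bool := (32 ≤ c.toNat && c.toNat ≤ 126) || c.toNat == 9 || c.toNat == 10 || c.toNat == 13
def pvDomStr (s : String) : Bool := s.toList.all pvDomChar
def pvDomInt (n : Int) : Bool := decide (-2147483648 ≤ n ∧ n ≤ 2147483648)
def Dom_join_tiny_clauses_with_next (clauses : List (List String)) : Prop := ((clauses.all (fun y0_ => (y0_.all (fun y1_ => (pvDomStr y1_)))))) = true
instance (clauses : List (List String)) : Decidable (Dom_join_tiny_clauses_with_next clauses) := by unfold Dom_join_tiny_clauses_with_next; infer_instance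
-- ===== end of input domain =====

-- B is a single forward pass (pending tiny clauses flushed into the next big clause) instead of
-- A's reversed iteration editing the accumulator's last element and reversing back: simpler decomposition.

-- ===== PORT A =====
-- one step of A's loop body: fixed[-1] = clause + fixed[-1] / fixed.append(clause)
def joinA_step (fixed : List (List String)) (clause : List String) : List (List String) :=
  if clause.length < 2 && !fixed.isEmpty then
    fixed.dropLast ++ [clause ++ fixed.getLast?.getD []]
  else
    fixed ++ [clause]

def join_tiny_clauses_with_next (clauses : List (List String)) : List (List String) :=
  let fixed := clauses.reverse.foldl joinA_step []
  fixed.reverse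

-- ===== PORT B =====
-- one step of B's loop body over the (result, pending) state
def joinB_step (rp : List (List String) × List (List String)) (clause : List String) :
    List (List String) × List (List String) :=
  let (result, pending) := rp
  if clause.length < 2 then
    (result, pending ++ [clause])
  else if pending.isEmpty then
    (result ++ [clause], [])
  else
    (result ++ [pending.flatten ++ clause], [])

def join_tiny_clauses_with_next_alt (clauses : List (List String)) : List (List String) :=
  let rp := clauses.foldl joinB_step ([], [])
  if rp.2.isEmpty then rp.1 else rp.1 ++ [rp.2.flatten]

-- ===== PRECONDITION & SPEC =====
def Spec_join_tiny_clauses_with_next (clauses : List (List String)) (out : List (List String)) : Prop := out = join_tiny_clauses_with_next_alt clauses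
instance (clauses : List (List String)) (out : List (List String)) : Decidable (Spec_join_tiny_clauses_with_next clauses out) := by unfold Spec_join_tiny_clauses_with_next; infer_instance

-- ===== CLAIM (what is proved, stated in full; the proofs are below) =====
def Claim_equal_join_tiny_clauses_with_next : Prop := ∀ (clauses : List (List String)), Dom_join_tiny_clauses_with_next clauses → Spec_join_tiny_clauses_with_next clauses (join_tiny_clauses_with_next clauses)

-- ===== LEMMAS AND PROOFS =====

-- common reference recursion both ports are proved equal to
def joinRef : List (List String) → List (List String)
  | [] => []
  | c :: rest =>
    if c.length < 2 then
      match joinRef rest with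
      | [] => [c]
      | h :: t => (c ++ h) :: t
    else c :: joinRef rest

-- B's tail finalisation as a function (proof helper)
def finishB (rp : List (List String) × List (List String)) : List (List String) :=
  if rp.2.isEmpty then rp.1 else rp.1 ++ [rp.2.flatten]

-- what B's finalisation yields, as a function of pending and the remaining input
def prependAll (pending : List (List String)) (r : List (List String)) : List (List String) :=
  match r with
  | [] => if pending.isEmpty then [] else [pending.flatten]
  | h :: t => (pending.flatten ++ h) :: t

lemma joinA_eq_ref (clauses : List (List String)) :
    clauses.reverse.foldl joinA_step [] = (joinRef clauses).reverse := by
  induction clauses with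
  | nil => simp [joinRef]
  | cons c rest ih =>
    rw [List.reverse_cons, List.foldl_append, List.foldl_cons, List.foldl_nil, ih]
    by_cases hlen : c.length < 2
    · cases h : joinRef rest with
      | nil =>
        simp only [joinRef, if_pos hlen, h]
        simp [joinA_step, hlen]
      | cons a as =>
        simp only [joinRef, if_pos hlen, h]
        simp [joinA_step, hlen, List.reverse_cons]
    · simp only [joinRef, if_neg hlen]
      simp [joinA_step, hlen]

lemma joinB_invariant (l : List (List String)) (result pending : List (List String)) :
    finishB (l.foldl joinB_step (result, pending)) = result ++ prependAll pending (joinRef l) := by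
  induction l generalizing result pending with
  | nil => cases pending <;> simp [finishB, prependAll, joinRef]
  | cons c rest ih =>
    rw [List.foldl_cons]
    by_cases hlen : c.length < 2
    · have hstep : joinB_step (result, pending) c = (result, pending ++ [c]) := by
        simp [joinB_step, hlen]
      rw [hstep, ih]
      simp only [joinRef, if_pos hlen]
      cases h : joinRef rest <;> cases pending <;> simp [prependAll]
    · by_cases hp : pending = []
      · have hstep : joinB_step (result, pending) c = (result ++ [c], []) := by
          simp [joinB_step, hlen, hp]
        rw [hstep, ih]
        simp only [joinRef, if_neg hlen]
        cases h : joinRef rest <;> simp [prependAll, hp]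
      · have hstep : joinB_step (result, pending) c = (result ++ [pending.flatten ++ c], []) := by
          simp [joinB_step, hlen, hp]
        rw [hstep, ih]
        simp only [joinRef, if_neg hlen]
        cases h : joinRef rest <;> simp [prependAll]

lemma joinB_eq_ref (clauses : List (List String)) :
    join_tiny_clauses_with_next_alt clauses = joinRef clauses := by
  have h := joinB_invariant clauses [] []
  have h2 : join_tiny_clauses_with_next_alt clauses
      = finishB (clauses.foldl joinB_step ([], [])) := rfl
  rw [h2, h]
  cases h3 : joinRef clauses <;> simp [prependAll]

-- ===== VERDICT (by name: the statement is the Claim_ definition above) =====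
theorem join_tiny_clauses_with_next_spec : Claim_equal_join_tiny_clauses_with_next := by
  intro clauses _
  unfold Spec_join_tiny_clauses_with_next join_tiny_clauses_with_next
  rw [joinB_eq_ref, joinA_eq_ref, List.reverse_reverse]
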